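-- pv_equiv track=rewrite | github.com/CTG813819/lvl_up | app/services/conquest_ai_service.py | _identify_knowledge_domain
-- ===== SOURCE A (Python) =====
-- def _identify_knowledge_domain(prompt: str) -> str:
--     """Identify the knowledge domain for the prompt"""
--     prompt_lower = prompt.lower()
--     if any(word in prompt_lower for word in ['flutter', 'dart', 'mobile']):
--         return 'flutter_development'
--     elif any(word in prompt_lower for word in ['apk', 'build', 'deploy']):
--         return 'apk_building'
--     elif any(word in prompt_lower for word in ['repository', 'github', 'version']):
--         return 'repository_management'
--     else:
--         return 'general_app_development'
-- ===== SOURCE B (Python) =====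
-- _KEYWORD_PRIORITY = {
--     'flutter': 0, 'dart': 0, 'mobile': 0,
--     'apk': 1, 'build': 1, 'deploy': 1,
--     'repository': 2, 'github': 2, 'version': 2,
-- }
-- _DOMAINS = ('flutter_development', 'apk_building', 'repository_management',
--             'general_app_development')
--
-- def _identify_knowledge_domain(prompt: str) -> str:
--     """Identify the knowledge domain: minimum priority over all matched keywords."""
--     p = prompt.lower()
--     best = min((pri for kw, pri in _KEYWORD_PRIORITY.items() if kw in p), default=3)
--     return _DOMAINS[best]
-- ===== Notes on version B (the rewrite author's own statement) =====
-- stated objective: alternative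
-- what changed: Replaced the ordered first-match if/elif chain by an aggregation: a flat keyword-to-priority map, a single min over the priorities of all matched keywords (default 3), then an index into a domain tuple.
import Mathlib
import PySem

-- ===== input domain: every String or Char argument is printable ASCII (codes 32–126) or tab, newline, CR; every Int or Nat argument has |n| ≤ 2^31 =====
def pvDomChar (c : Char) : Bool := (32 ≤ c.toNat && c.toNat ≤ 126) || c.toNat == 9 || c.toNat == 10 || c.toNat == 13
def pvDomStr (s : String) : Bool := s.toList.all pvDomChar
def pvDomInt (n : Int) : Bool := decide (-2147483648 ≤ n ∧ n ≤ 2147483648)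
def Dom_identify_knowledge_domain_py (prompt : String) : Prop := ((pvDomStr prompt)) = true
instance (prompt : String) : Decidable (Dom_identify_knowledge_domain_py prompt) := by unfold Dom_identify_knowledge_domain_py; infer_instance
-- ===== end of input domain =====

-- B replaces the ordered if/elif first-match chain by a min-priority aggregation over a flat keyword->priority map with a domain table lookup (alternative; same cost).


-- ===== PORT A =====
def identify_knowledge_domain_py (prompt : String) : String :=
  let prompt_lower := PySem.Str.lower prompt
  if (["flutter", "dart", "mobile"] : List String).any (fun word => PySem.Str.isIn word prompt_lower) then
    "flutter_development"
  else if (["apk", "build", "deploy"] : List String).any (fun word => PySem.Str.isIn word prompt_lower) then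
    "apk_building"
  else if (["repository", "github", "version"] : List String).any (fun word => PySem.Str.isIn word prompt_lower) then
    "repository_management"
  else
    "general_app_development"

-- ===== PORT B =====
def keywordPriority : List (String × Int) :=
  [("flutter", 0), ("dart", 0), ("mobile", 0),
   ("apk", 1), ("build", 1), ("deploy", 1),
   ("repository", 2), ("github", 2), ("version", 2)]

def domainNames : List String :=
  ["flutter_development", "apk_building", "repository_management", "general_app_development"]

def identify_knowledge_domain_py_alt (prompt : String) : String :=
  let p := PySem.Str.lower prompt
  -- min((pri for kw, pri in _KEYWORD_PRIORITY.items() if kw in p), default=3)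
  let matched := (keywordPriority.filter (fun kv => PySem.Str.isIn kv.1 p)).map (fun kv => kv.2)
  let best : Int := match PySem.List.min? matched (fun x => x) with
    | some m => m
    | none => 3
  -- _DOMAINS[best]: best ∈ {0,1,2,3} so the index is always in range; exact
  (PySem.List.pyGet? domainNames best).getD ""

-- ===== PRECONDITION & SPEC =====
def Spec_identify_knowledge_domain_py (prompt : String) (out : String) : Prop := out = identify_knowledge_domain_py_alt prompt
instance (prompt : String) (out : String) : Decidable (Spec_identify_knowledge_domain_py prompt out) := by unfold Spec_identify_knowledge_domain_py; infer_instance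

-- ===== CLAIM =====
def Claim_equal_identify_knowledge_domain_py : Prop := ∀ (prompt : String), Dom_identify_knowledge_domain_py prompt → Spec_identify_knowledge_domain_py prompt (identify_knowledge_domain_py prompt)

-- ===== LEMMAS AND PROOFS =====

-- ===== VERDICT =====
-- key combinatorial fact: for any membership predicate f on keywords, the if/elif chain
-- equals the min-priority aggregation (proved by exhausting the 2^9 boolean cases)
set_option maxHeartbeats 2000000 in
theorem pv_key (f : String → Bool) :
    (if (["flutter", "dart", "mobile"] : List String).any f then
      "flutter_development"
    else if (["apk", "build", "deploy"] : List String).any f then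
      "apk_building"
    else if (["repository", "github", "version"] : List String).any f then
      "repository_management"
    else
      "general_app_development")
    =
    (PySem.List.pyGet? domainNames
      (match PySem.List.min? ((keywordPriority.filter (fun kv => f kv.1)).map (fun kv => kv.2)) (fun x => x) with
        | some m => m
        | none => 3)).getD "" := by
  rcases Bool.dichotomy (f "flutter") with h1|h1 <;>
  rcases Bool.dichotomy (f "dart") with h2|h2 <;>
  rcases Bool.dichotomy (f "mobile") with h3|h3 <;>
  rcases Bool.dichotomy (f "apk") with h4|h4 <;>
  rcases Bool.dichotomy (f "build") with h5|h5 <;>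
  rcases Bool.dichotomy (f "deploy") with h6|h6 <;>
  rcases Bool.dichotomy (f "repository") with h7|h7 <;>
  rcases Bool.dichotomy (f "github") with h8|h8 <;>
  rcases Bool.dichotomy (f "version") with h9|h9 <;>
  simp [keywordPriority, domainNames, h1, h2, h3, h4, h5, h6, h7, h8, h9, PySem.List.min?, PySem.List.pyGet?, PySem.List.pyIdx?]

-- ===== VERDICT =====
theorem identify_knowledge_domain_py_spec : Claim_equal_identify_knowledge_domain_py := by
  intro prompt _
  exact pv_key (fun w => PySem.Str.isIn w (PySem.Str.lower prompt))
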